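-- pv_equiv track=rewrite | github.com/niknibud-student/ege | polyakov/16_23.py | f
-- ===== SOURCE A (Python) =====
-- def f(n):
--     k = 0
--     k += 1
--     if n >= 1:
--         k += 1
--         k += f(n-1)
--         k += f(n-3)
--         k += 1
--     return k
-- ===== SOURCE B (Python) =====
-- def f(n):
--     if n < 1:
--         return 1
--     a = b = c = 1  # f(m) = 1 for all m <= 0; rolling window f(i-2), f(i-1), f(i)
--     for _ in range(n):
--         a, b, c = b, c, 3 + c + a
--     return c
-- ===== Notes on version B (the rewrite author's own statement) =====
-- stated objective: faster
-- what changed: Replaces the exponential double recursion with a bottom-up rolling-window DP over n (three variables, one loop).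
import Mathlib
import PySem

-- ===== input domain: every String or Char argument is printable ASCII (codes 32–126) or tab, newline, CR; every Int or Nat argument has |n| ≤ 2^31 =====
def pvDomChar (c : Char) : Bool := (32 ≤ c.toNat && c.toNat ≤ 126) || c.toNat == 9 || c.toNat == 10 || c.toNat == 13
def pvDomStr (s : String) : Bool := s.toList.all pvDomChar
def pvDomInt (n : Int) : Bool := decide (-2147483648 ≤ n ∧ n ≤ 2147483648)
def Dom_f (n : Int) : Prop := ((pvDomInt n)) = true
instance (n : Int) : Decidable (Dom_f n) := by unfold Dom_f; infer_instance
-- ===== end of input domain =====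

-- B replaces A's exponential double recursion by a linear bottom-up DP; return values are equal.

-- ===== PORT A =====
def f (n : Int) : Int :=
  let k : Int := 0
  let k := k + 1
  if _h : n ≥ 1 then
    let k := k + 1
    let k := k + f (n - 1)
    let k := k + f (n - 3)
    let k := k + 1
    k
  else
    k
termination_by n.toNat
decreasing_by all_goals omega

-- ===== PORT B =====
def f_alt (n : Int) : Int :=
  if n < 1 then 1
  else
    -- rolling window (a, b, c) = (f(i-2), f(i-1), f(i)); loop 'for _ in range(n)'
    let s := (List.range n.toNat).foldl
      (fun (s : Int × Int × Int) _ => (s.2.1, s.2.2, 3 + s.2.2 + s.1)) (1, 1, 1)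
    s.2.2

-- ===== PRECONDITION & SPEC =====
-- Pre_ excludes exactly the inputs on which the Python A raises RecursionError
-- (CPython's default recursion limit of 1000 frames: A recurses to depth n, raising for n >= 999).
def Pre_f (n : Int) : Prop := n < 999
instance (n : Int) : Decidable (Pre_f n) := by unfold Pre_f; infer_instance
def pvWitness_f : Int := (5)

def Spec_f (n : Int) (out : Int) : Prop := out = f_alt n
instance (n : Int) (out : Int) : Decidable (Spec_f n out) := by unfold Spec_f; infer_instance

-- ===== CLAIM (what is proved, stated in full; the proofs are below) =====
def Claim_equal_f : Prop := ∀ (n : Int), Dom_f n → Pre_f n → Spec_f n (f n)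

-- ===== LEMMAS AND PROOFS =====

theorem f_nonpos {n : Int} (h : ¬ n ≥ 1) : f n = 1 := by
  rw [f.eq_def]; simp [h]

theorem f_pos {n : Int} (h : n ≥ 1) : f n = 3 + f (n - 1) + f (n - 3) := by
  rw [f.eq_def]; simp only [dif_pos h]; ring

theorem fold_inv (k : Nat) :
    (List.range k).foldl
      (fun (s : Int × Int × Int) _ => (s.2.1, s.2.2, 3 + s.2.2 + s.1)) (1, 1, 1)
      = (f ((k : Int) - 2), f ((k : Int) - 1), f (k : Int)) := by
  induction k with
  | zero =>
      simp only [List.range_zero, List.foldl_nil, Nat.cast_zero, Prod.mk.injEq, zero_sub]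
      exact ⟨(f_nonpos (by omega)).symm, (f_nonpos (by omega)).symm, (f_nonpos (by omega)).symm⟩
  | succ k ih =>
      rw [List.range_succ, List.foldl_append, ih]
      simp only [List.foldl_cons, List.foldl_nil]
      push_cast
      have e1 : (k : Int) + 1 - 2 = (k : Int) - 1 := by ring
      have e2 : (k : Int) + 1 - 1 = (k : Int) := by ring
      have e3 : (k : Int) + 1 - 3 = (k : Int) - 2 := by ring
      rw [f_pos (by omega : (k : Int) + 1 ≥ 1), e1, e2, e3]

theorem f_eq_alt (n : Int) : f n = f_alt n := by
  unfold f_alt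
  by_cases h : n < 1
  · simp [h, f_nonpos (by omega : ¬ n ≥ 1)]
  · simp only [h, if_false]
    rw [fold_inv n.toNat]
    have : ((n.toNat : Int)) = n := by omega
    rw [this]

-- ===== VERDICT (by name: the statement is the Claim_ definition above) =====
theorem f_spec : Claim_equal_f := by
  intro n _ _
  unfold Spec_f
  exact f_eq_alt n
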